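-- pv_equiv track=rewrite | github.com/SachinGupta93/car-insurance-prediction | backend/enhanced_local_analyzer.py | _adjust_probabilities_by_context
-- ===== SOURCE A (Python) =====
-- def _adjust_probabilities_by_context(probabilities, context_hint):
--     """Adjust probabilities based on context hints (useful for testing)"""
--     context_lower = context_hint.lower()
--
--     # Brand-based hints
--     luxury_brands = ['rolls-royce', 'bentley', 'ferrari', 'lamborghini', 'maserati']
--     ultra_luxury_brands = ['bmw 7 series', 'mercedes s-class', 'audi a8']
--     luxury_brands_general = ['bmw', 'mercedes', 'audi', 'jaguar', 'volvo']
--     premium_brands = ['honda civic', 'toyota camry', 'hyundai tucson', 'jeep', 'skoda', 'volkswagen']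
--
--     if any(brand in context_lower for brand in luxury_brands):
--         probabilities['Super-Luxury'] = 70
--         probabilities['Ultra-Luxury'] = 25
--         probabilities['Luxury'] = 5
--         probabilities['Premium'] = 0
--         probabilities['Mid-Range'] = 0
--         probabilities['Economy'] = 0
--     elif any(brand in context_lower for brand in ultra_luxury_brands):
--         probabilities['Ultra-Luxury'] = 80
--         probabilities['Luxury'] = 20
--         probabilities['Premium'] = 0
--         probabilities['Mid-Range'] = 0
--         probabilities['Economy'] = 0
--         probabilities['Super-Luxury'] = 0
--     elif any(brand in context_lower for brand in luxury_brands_general):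
--         probabilities['Luxury'] = 60
--         probabilities['Ultra-Luxury'] = 30
--         probabilities['Premium'] = 10
--         probabilities['Mid-Range'] = 0
--         probabilities['Economy'] = 0
--         probabilities['Super-Luxury'] = 0
--     elif any(brand in context_lower for brand in premium_brands):
--         probabilities['Premium'] = 70
--         probabilities['Mid-Range'] = 25
--         probabilities['Luxury'] = 5
--         probabilities['Ultra-Luxury'] = 0
--         probabilities['Economy'] = 0
--         probabilities['Super-Luxury'] = 0
--
--     # Segment-based hints
--     if 'economy' in context_lower:
--         probabilities['Economy'] = 90
--         probabilities['Mid-Range'] = 10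
--         probabilities['Premium'] = 0
--         probabilities['Luxury'] = 0
--         probabilities['Ultra-Luxury'] = 0
--         probabilities['Super-Luxury'] = 0
--     elif 'mid-range' in context_lower:
--         probabilities['Mid-Range'] = 80
--         probabilities['Economy'] = 15
--         probabilities['Premium'] = 5
--         probabilities['Luxury'] = 0
--         probabilities['Ultra-Luxury'] = 0
--         probabilities['Super-Luxury'] = 0
--
--     return probabilities
-- ===== SOURCE B (Python) =====
-- def _adjust_probabilities_by_context(probabilities, context_hint):
--     """Adjust probabilities based on context hints (useful for testing)"""
--     cl = context_hint.lower()
--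
--     BRAND_TIER = {'rolls-royce': 0, 'bentley': 0, 'ferrari': 0, 'lamborghini': 0,
--                   'maserati': 0,
--                   'bmw 7 series': 1, 'mercedes s-class': 1, 'audi a8': 1,
--                   'bmw': 2, 'mercedes': 2, 'audi': 2, 'jaguar': 2, 'volvo': 2,
--                   'honda civic': 3, 'toyota camry': 3, 'hyundai tucson': 3,
--                   'jeep': 3, 'skoda': 3, 'volkswagen': 3}
--     SEGMENT_TIER = {'economy': 0, 'mid-range': 1}
--
--     BRAND_RESULTS = [
--         [('Super-Luxury', 70), ('Ultra-Luxury', 25), ('Luxury', 5),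
--          ('Premium', 0), ('Mid-Range', 0), ('Economy', 0)],
--         [('Ultra-Luxury', 80), ('Luxury', 20), ('Premium', 0),
--          ('Mid-Range', 0), ('Economy', 0), ('Super-Luxury', 0)],
--         [('Luxury', 60), ('Ultra-Luxury', 30), ('Premium', 10),
--          ('Mid-Range', 0), ('Economy', 0), ('Super-Luxury', 0)],
--         [('Premium', 70), ('Mid-Range', 25), ('Luxury', 5),
--          ('Ultra-Luxury', 0), ('Economy', 0), ('Super-Luxury', 0)],
--     ]
--     SEGMENT_RESULTS = [
--         [('Economy', 90), ('Mid-Range', 10), ('Premium', 0),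
--          ('Luxury', 0), ('Ultra-Luxury', 0), ('Super-Luxury', 0)],
--         [('Mid-Range', 80), ('Economy', 15), ('Premium', 5),
--          ('Luxury', 0), ('Ultra-Luxury', 0), ('Super-Luxury', 0)],
--     ]
--
--     def best_tier(table):
--         best = None
--         for kw, t in table.items():
--             if kw in cl and (best is None or t < best):
--                 best = t
--         return best
--
--     brand = best_tier(BRAND_TIER)
--     segment = best_tier(SEGMENT_TIER)
--
--     update = {} if brand is None else dict(BRAND_RESULTS[brand])
--     if segment is not None:
--         update.update(SEGMENT_RESULTS[segment])
--     probabilities.update(update)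
--     return probabilities
-- ===== Notes on version B (the rewrite author's own statement) =====
-- stated objective: alternative
-- what changed: Replaces the two hard-coded if/elif cascades by a flat keyword-to-tier table scanned once with a minimum-tier accumulator (no elif chain, no first-match break), result rows indexed by the winning tier, and a single merged dict.update instead of two staged in-place assignments.
import Mathlib
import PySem

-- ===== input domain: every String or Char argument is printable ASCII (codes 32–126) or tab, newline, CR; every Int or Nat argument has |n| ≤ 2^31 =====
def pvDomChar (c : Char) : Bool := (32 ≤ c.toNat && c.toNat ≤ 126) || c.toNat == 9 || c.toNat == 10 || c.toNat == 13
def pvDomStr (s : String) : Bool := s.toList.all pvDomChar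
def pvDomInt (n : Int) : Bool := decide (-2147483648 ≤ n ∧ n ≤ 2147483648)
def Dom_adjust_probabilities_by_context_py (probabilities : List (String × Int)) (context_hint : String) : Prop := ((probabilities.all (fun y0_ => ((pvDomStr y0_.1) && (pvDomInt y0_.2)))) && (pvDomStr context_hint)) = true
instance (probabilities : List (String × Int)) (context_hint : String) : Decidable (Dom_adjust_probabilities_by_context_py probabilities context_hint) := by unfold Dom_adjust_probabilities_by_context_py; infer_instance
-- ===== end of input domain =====

-- B replaces A's two hard-coded if/elif cascades by one flat keyword→tier table scanned
-- with a minimum-tier accumulator, result tables indexed by the winning tier, and a single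
-- merged dict.update; return-value equivalence (the Python mutates the dict in place
-- identically in both versions).

-- ===== PORT A =====
def adjust_probabilities_by_context_py (probabilities : List (String × Int)) (context_hint : String) : List (String × Int) :=
  let context_lower := PySem.Str.lower context_hint
  let luxury_brands := ["rolls-royce", "bentley", "ferrari", "lamborghini", "maserati"]
  let ultra_luxury_brands := ["bmw 7 series", "mercedes s-class", "audi a8"]
  let luxury_brands_general := ["bmw", "mercedes", "audi", "jaguar", "volvo"]
  let premium_brands := ["honda civic", "toyota camry", "hyundai tucson", "jeep", "skoda", "volkswagen"]
  let d : PySem.Dict String Int := PySem.Dict.mk probabilities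
  let d :=
    if luxury_brands.any (fun brand => PySem.Str.isIn brand context_lower) then
      ((((((d.insert "Super-Luxury" 70).insert "Ultra-Luxury" 25).insert "Luxury" 5).insert
        "Premium" 0).insert "Mid-Range" 0).insert "Economy" 0)
    else if ultra_luxury_brands.any (fun brand => PySem.Str.isIn brand context_lower) then
      ((((((d.insert "Ultra-Luxury" 80).insert "Luxury" 20).insert "Premium" 0).insert
        "Mid-Range" 0).insert "Economy" 0).insert "Super-Luxury" 0)
    else if luxury_brands_general.any (fun brand => PySem.Str.isIn brand context_lower) then
      ((((((d.insert "Luxury" 60).insert "Ultra-Luxury" 30).insert "Premium" 10).insert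
        "Mid-Range" 0).insert "Economy" 0).insert "Super-Luxury" 0)
    else if premium_brands.any (fun brand => PySem.Str.isIn brand context_lower) then
      ((((((d.insert "Premium" 70).insert "Mid-Range" 25).insert "Luxury" 5).insert
        "Ultra-Luxury" 0).insert "Economy" 0).insert "Super-Luxury" 0)
    else d
  let d :=
    if PySem.Str.isIn "economy" context_lower then
      ((((((d.insert "Economy" 90).insert "Mid-Range" 10).insert "Premium" 0).insert
        "Luxury" 0).insert "Ultra-Luxury" 0).insert "Super-Luxury" 0)
    else if PySem.Str.isIn "mid-range" context_lower then
      ((((((d.insert "Mid-Range" 80).insert "Economy" 15).insert "Premium" 5).insert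
        "Luxury" 0).insert "Ultra-Luxury" 0).insert "Super-Luxury" 0)
    else d
  d.items

-- ===== PORT B =====
-- flat keyword → tier table (dict literal in Source B, iterated in insertion order)
def pvBrandTier : List (String × Int) :=
  [("rolls-royce", 0), ("bentley", 0), ("ferrari", 0), ("lamborghini", 0), ("maserati", 0),
   ("bmw 7 series", 1), ("mercedes s-class", 1), ("audi a8", 1),
   ("bmw", 2), ("mercedes", 2), ("audi", 2), ("jaguar", 2), ("volvo", 2),
   ("honda civic", 3), ("toyota camry", 3), ("hyundai tucson", 3),
   ("jeep", 3), ("skoda", 3), ("volkswagen", 3)]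

def pvSegmentTier : List (String × Int) := [("economy", 0), ("mid-range", 1)]

def pvBrandResults : List (List (String × Int)) :=
  [[("Super-Luxury", 70), ("Ultra-Luxury", 25), ("Luxury", 5), ("Premium", 0), ("Mid-Range", 0), ("Economy", 0)],
   [("Ultra-Luxury", 80), ("Luxury", 20), ("Premium", 0), ("Mid-Range", 0), ("Economy", 0), ("Super-Luxury", 0)],
   [("Luxury", 60), ("Ultra-Luxury", 30), ("Premium", 10), ("Mid-Range", 0), ("Economy", 0), ("Super-Luxury", 0)],
   [("Premium", 70), ("Mid-Range", 25), ("Luxury", 5), ("Ultra-Luxury", 0), ("Economy", 0), ("Super-Luxury", 0)]]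

def pvSegmentResults : List (List (String × Int)) :=
  [[("Economy", 90), ("Mid-Range", 10), ("Premium", 0), ("Luxury", 0), ("Ultra-Luxury", 0), ("Super-Luxury", 0)],
   [("Mid-Range", 80), ("Economy", 15), ("Premium", 5), ("Luxury", 0), ("Ultra-Luxury", 0), ("Super-Luxury", 0)]]

-- one step of Source B's best_tier loop: keep the smallest tier whose keyword occurs in cl
def pvBestStep (cl : String) (best : Option Int) (p : String × Int) : Option Int :=
  if PySem.Str.isIn p.1 cl && (match best with | none => true | some m => decide (p.2 < m))
  then some p.2 else best

def pvBestTier (cl : String) (table : List (String × Int)) : Option Int :=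
  table.foldl (pvBestStep cl) none

def adjust_probabilities_by_context_py_alt (probabilities : List (String × Int)) (context_hint : String) : List (String × Int) :=
  let cl := PySem.Str.lower context_hint
  let brand := pvBestTier cl pvBrandTier
  let segment := pvBestTier cl pvSegmentTier
  -- BRAND_RESULTS[brand] / SEGMENT_RESULTS[segment]: the index comes from the tier table,
  -- so it is always in range; the `.getD []` default is unreachable
  let upd : PySem.Dict String Int :=
    match brand with
    | none => PySem.Dict.empty
    | some t => PySem.Dict.ofList ((PySem.List.pyGet? pvBrandResults t).getD [])
  let upd :=
    match segment with
    | none => upd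
    | some s => upd.update ((PySem.List.pyGet? pvSegmentResults s).getD [])
  ((PySem.Dict.mk probabilities).update upd.items).items

-- ===== PRECONDITION & SPEC =====
def Spec_adjust_probabilities_by_context_py (probabilities : List (String × Int)) (context_hint : String) (out : List (String × Int)) : Prop := out = adjust_probabilities_by_context_py_alt probabilities context_hint
instance (probabilities : List (String × Int)) (context_hint : String) (out : List (String × Int)) : Decidable (Spec_adjust_probabilities_by_context_py probabilities context_hint out) := by unfold Spec_adjust_probabilities_by_context_py; infer_instance

-- ===== CLAIM (what is proved, stated in full; the proofs are below) =====
def Claim_equal_adjust_probabilities_by_context_py : Prop := ∀ (probabilities : List (String × Int)) (context_hint : String), Dom_adjust_probabilities_by_context_py probabilities context_hint → Spec_adjust_probabilities_by_context_py probabilities context_hint (adjust_probabilities_by_context_py probabilities context_hint)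

-- ===== LEMMAS AND PROOFS =====

-- ---- characterising Source B's best_tier scan ----

-- a group of table entries that all carry tier i never displaces an accumulator ≤ i
theorem pvBestStep_stay (cl : String) (g : List (String × Int)) (i m : Int)
    (hg : ∀ p ∈ g, p.2 = i) (hm : m ≤ i) :
    g.foldl (pvBestStep cl) (some m) = some m := by
  induction g with
  | nil => rfl
  | cons p t ih =>
    have hp : p.2 = i := hg p (List.mem_cons_self ..)
    have hlt : decide (p.2 < m) = false := by simp; omega
    rw [List.foldl_cons,
      show pvBestStep cl (some m) p = some m from by simp only [pvBestStep, hlt]; simp]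
    exact ih (fun q hq => hg q (List.mem_cons_of_mem _ hq))

-- scanning a constant-tier group from an empty accumulator yields its tier iff some keyword matches
theorem pvBestStep_group (cl : String) (g : List (String × Int)) (i : Int)
    (hg : ∀ p ∈ g, p.2 = i) :
    g.foldl (pvBestStep cl) none =
      if g.any (fun p => PySem.Str.isIn p.1 cl) then some i else none := by
  induction g with
  | nil => rfl
  | cons p t ih =>
    have hp : p.2 = i := hg p (List.mem_cons_self ..)
    have ht : ∀ q ∈ t, q.2 = i := fun q hq => hg q (List.mem_cons_of_mem _ hq)
    by_cases hin : PySem.Str.isIn p.1 cl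
    · rw [List.foldl_cons,
        show pvBestStep cl none p = some p.2 from by simp only [pvBestStep, hin]; rfl,
        hp, pvBestStep_stay cl t i i ht le_rfl]
      simp only [List.any_cons, hin, Bool.true_or, if_true]
    · have hin' : PySem.Str.isIn p.1 cl = false := by simpa using hin
      rw [List.foldl_cons,
        show pvBestStep cl none p = none from by simp only [pvBestStep, hin']; rfl,
        ih ht]
      simp only [List.any_cons, hin', Bool.false_or]

theorem pvBestTier_brand (cl : String) :
    pvBestTier cl pvBrandTier =
      if ["rolls-royce", "bentley", "ferrari", "lamborghini", "maserati"].any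
           (fun brand => PySem.Str.isIn brand cl) then some 0
      else if ["bmw 7 series", "mercedes s-class", "audi a8"].any
           (fun brand => PySem.Str.isIn brand cl) then some 1
      else if ["bmw", "mercedes", "audi", "jaguar", "volvo"].any
           (fun brand => PySem.Str.isIn brand cl) then some 2
      else if ["honda civic", "toyota camry", "hyundai tucson", "jeep", "skoda", "volkswagen"].any
           (fun brand => PySem.Str.isIn brand cl) then some 3
      else none := by
  have e0 : (["rolls-royce", "bentley", "ferrari", "lamborghini", "maserati"].any
      (fun brand => PySem.Str.isIn brand cl)) = ([("rolls-royce", (0:Int)), ("bentley", 0), ("ferrari", 0), ("lamborghini", 0), ("maserati", 0)].any (fun p => PySem.Str.isIn p.1 cl)) := by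
    simp only [List.any_cons, List.any_nil]
  have e1 : (["bmw 7 series", "mercedes s-class", "audi a8"].any
      (fun brand => PySem.Str.isIn brand cl)) = ([("bmw 7 series", (1:Int)), ("mercedes s-class", 1), ("audi a8", 1)].any (fun p => PySem.Str.isIn p.1 cl)) := by
    simp only [List.any_cons, List.any_nil]
  have e2 : (["bmw", "mercedes", "audi", "jaguar", "volvo"].any
      (fun brand => PySem.Str.isIn brand cl)) = ([("bmw", (2:Int)), ("mercedes", 2), ("audi", 2), ("jaguar", 2), ("volvo", 2)].any (fun p => PySem.Str.isIn p.1 cl)) := by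
    simp only [List.any_cons, List.any_nil]
  have e3 : (["honda civic", "toyota camry", "hyundai tucson", "jeep", "skoda", "volkswagen"].any
      (fun brand => PySem.Str.isIn brand cl)) = ([("honda civic", (3:Int)), ("toyota camry", 3), ("hyundai tucson", 3), ("jeep", 3), ("skoda", 3), ("volkswagen", 3)].any (fun p => PySem.Str.isIn p.1 cl)) := by
    simp only [List.any_cons, List.any_nil]
  have hg0 : ∀ p ∈ [("rolls-royce", (0:Int)), ("bentley", 0), ("ferrari", 0), ("lamborghini", 0), ("maserati", 0)], p.2 = 0 := by intro p hp; fin_cases hp <;> rfl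
  have hg1 : ∀ p ∈ [("bmw 7 series", (1:Int)), ("mercedes s-class", 1), ("audi a8", 1)], p.2 = 1 := by intro p hp; fin_cases hp <;> rfl
  have hg2 : ∀ p ∈ [("bmw", (2:Int)), ("mercedes", 2), ("audi", 2), ("jaguar", 2), ("volvo", 2)], p.2 = 2 := by intro p hp; fin_cases hp <;> rfl
  have hg3 : ∀ p ∈ [("honda civic", (3:Int)), ("toyota camry", 3), ("hyundai tucson", 3), ("jeep", 3), ("skoda", 3), ("volkswagen", 3)], p.2 = 3 := by intro p hp; fin_cases hp <;> rfl
  rw [e0, e1, e2, e3]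
  show List.foldl (pvBestStep cl) none ([("rolls-royce", (0:Int)), ("bentley", 0), ("ferrari", 0), ("lamborghini", 0), ("maserati", 0)] ++ ([("bmw 7 series", (1:Int)), ("mercedes s-class", 1), ("audi a8", 1)] ++ ([("bmw", (2:Int)), ("mercedes", 2), ("audi", 2), ("jaguar", 2), ("volvo", 2)] ++ [("honda civic", (3:Int)), ("toyota camry", 3), ("hyundai tucson", 3), ("jeep", 3), ("skoda", 3), ("volkswagen", 3)]))) = _
  rw [List.foldl_append, List.foldl_append, List.foldl_append,
    pvBestStep_group cl [("rolls-royce", (0:Int)), ("bentley", 0), ("ferrari", 0), ("lamborghini", 0), ("maserati", 0)] 0 hg0]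
  by_cases a0 : [("rolls-royce", (0:Int)), ("bentley", 0), ("ferrari", 0), ("lamborghini", 0), ("maserati", 0)].any (fun p => PySem.Str.isIn p.1 cl)
  · rw [if_pos a0, if_pos a0,
      pvBestStep_stay cl [("bmw 7 series", (1:Int)), ("mercedes s-class", 1), ("audi a8", 1)] 1 0 hg1 (by norm_num),
      pvBestStep_stay cl [("bmw", (2:Int)), ("mercedes", 2), ("audi", 2), ("jaguar", 2), ("volvo", 2)] 2 0 hg2 (by norm_num),
      pvBestStep_stay cl [("honda civic", (3:Int)), ("toyota camry", 3), ("hyundai tucson", 3), ("jeep", 3), ("skoda", 3), ("volkswagen", 3)] 3 0 hg3 (by norm_num)]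
  · rw [if_neg a0, if_neg a0, pvBestStep_group cl [("bmw 7 series", (1:Int)), ("mercedes s-class", 1), ("audi a8", 1)] 1 hg1]
    by_cases a1 : [("bmw 7 series", (1:Int)), ("mercedes s-class", 1), ("audi a8", 1)].any (fun p => PySem.Str.isIn p.1 cl)
    · rw [if_pos a1, if_pos a1,
        pvBestStep_stay cl [("bmw", (2:Int)), ("mercedes", 2), ("audi", 2), ("jaguar", 2), ("volvo", 2)] 2 1 hg2 (by norm_num),
        pvBestStep_stay cl [("honda civic", (3:Int)), ("toyota camry", 3), ("hyundai tucson", 3), ("jeep", 3), ("skoda", 3), ("volkswagen", 3)] 3 1 hg3 (by norm_num)]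
    · rw [if_neg a1, if_neg a1, pvBestStep_group cl [("bmw", (2:Int)), ("mercedes", 2), ("audi", 2), ("jaguar", 2), ("volvo", 2)] 2 hg2]
      by_cases a2 : [("bmw", (2:Int)), ("mercedes", 2), ("audi", 2), ("jaguar", 2), ("volvo", 2)].any (fun p => PySem.Str.isIn p.1 cl)
      · rw [if_pos a2, if_pos a2, pvBestStep_stay cl [("honda civic", (3:Int)), ("toyota camry", 3), ("hyundai tucson", 3), ("jeep", 3), ("skoda", 3), ("volkswagen", 3)] 3 2 hg3 (by norm_num)]
      · rw [if_neg a2, if_neg a2, pvBestStep_group cl [("honda civic", (3:Int)), ("toyota camry", 3), ("hyundai tucson", 3), ("jeep", 3), ("skoda", 3), ("volkswagen", 3)] 3 hg3]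


theorem pvBestTier_segment (cl : String) :
    pvBestTier cl pvSegmentTier =
      if PySem.Str.isIn "economy" cl then some 0
      else if PySem.Str.isIn "mid-range" cl then some 1
      else none := by
  have e0 : PySem.Str.isIn "economy" cl = ([("economy", (0:Int))].any (fun p => PySem.Str.isIn p.1 cl)) := by
    simp only [List.any_cons, List.any_nil, Bool.or_false]
  have e1 : PySem.Str.isIn "mid-range" cl = ([("mid-range", (1:Int))].any (fun p => PySem.Str.isIn p.1 cl)) := by
    simp only [List.any_cons, List.any_nil, Bool.or_false]
  have hg0 : ∀ p ∈ [("economy", (0:Int))], p.2 = 0 := by intro p hp; fin_cases hp <;> rfl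
  have hg1 : ∀ p ∈ [("mid-range", (1:Int))], p.2 = 1 := by intro p hp; fin_cases hp <;> rfl
  rw [e0, e1]
  show List.foldl (pvBestStep cl) none ([("economy", (0:Int))] ++ [("mid-range", (1:Int))]) = _
  rw [List.foldl_append, pvBestStep_group cl [("economy", (0:Int))] 0 hg0]
  by_cases a0 : [("economy", (0:Int))].any (fun p => PySem.Str.isIn p.1 cl)
  · rw [if_pos a0, if_pos a0, pvBestStep_stay cl [("mid-range", (1:Int))] 1 0 hg1 (by norm_num)]
  · rw [if_neg a0, if_neg a0, pvBestStep_group cl [("mid-range", (1:Int))] 1 hg1]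

-- ---- dict-update algebra (items-level facts about PySem.Dict.insert chains) ----

theorem pv_map_overwrite_id {κ ν : Type} [BEq κ] (d : PySem.Dict κ ν) (k : κ) (w : ν)
    (h : d.contains k = false) :
    d.items.map (fun p => if (p.1 == k) = true then (k, w) else p) = d.items := by
  have h' : ∀ p ∈ d.items, (p.1 == k) = false := by
    intro p hp
    by_contra hc
    have : d.contains k = true := by
      simp only [PySem.Dict.contains, List.any_eq_true]
      exact ⟨p, hp, by simpa using hc⟩
    simp [this] at h
  conv_rhs => rw [← List.map_id d.items]
  apply List.map_congr_left
  intro p hp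
  simp [h' p hp]

theorem pv_insert_absorb {κ ν : Type} [BEq κ] [LawfulBEq κ] (d : PySem.Dict κ ν) (k : κ) (v w : ν) :
    (d.insert k v).insert k w = d.insert k w := by
  apply PySem.Dict.ext
  by_cases h : d.contains k = true
  · rw [PySem.Dict.items_insert_of_contains _ w
        (by rw [PySem.Dict.contains_insert]; simp),
      PySem.Dict.items_insert_of_contains _ v h,
      PySem.Dict.items_insert_of_contains _ w h, List.map_map]
    apply List.map_congr_left
    intro p _
    by_cases hp : (p.1 == k) = true <;> simp [hp]
  · have h' : d.contains k = false := by simpa using h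
    rw [PySem.Dict.items_insert_of_contains _ w
        (by rw [PySem.Dict.contains_insert]; simp),
      PySem.Dict.items_insert_of_not_contains _ v h',
      PySem.Dict.items_insert_of_not_contains _ w h',
      List.map_append, pv_map_overwrite_id d k w h']
    simp

theorem pv_insert_comm {κ ν : Type} [BEq κ] [LawfulBEq κ] (d : PySem.Dict κ ν)
    (k k' : κ) (v w : ν) (hne : k ≠ k') (hc : d.contains k = true) :
    (d.insert k' v).insert k w = (d.insert k w).insert k' v := by
  apply PySem.Dict.ext
  have hck : (d.insert k' v).contains k = true := by
    rw [PySem.Dict.contains_insert]; simp [hc]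
  have hne' : (k == k') = false := by simpa using hne
  have hne'' : (k' == k) = false := by simpa using hne.symm
  by_cases h' : d.contains k' = true
  · have hck' : (d.insert k w).contains k' = true := by
      rw [PySem.Dict.contains_insert]; simp [h']
    rw [PySem.Dict.items_insert_of_contains _ w hck,
      PySem.Dict.items_insert_of_contains _ v h',
      PySem.Dict.items_insert_of_contains _ v hck',
      PySem.Dict.items_insert_of_contains _ w hc, List.map_map, List.map_map]
    apply List.map_congr_left
    intro p _
    by_cases hp : (p.1 == k') = true
    · have hpk : (p.1 == k) = false := by
        have := eq_of_beq hp; subst this; exact hne''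
      simp [hp, hpk, hne'']
    · by_cases hpk : (p.1 == k) = true <;> simp [hp, hpk, hne']
  · have h'' : d.contains k' = false := by simpa using h'
    have hck2 : (d.insert k w).contains k' = false := by
      rw [PySem.Dict.contains_insert]; simp [h'', hne'']
    rw [PySem.Dict.items_insert_of_contains _ w hck,
      PySem.Dict.items_insert_of_not_contains _ v h'',
      PySem.Dict.items_insert_of_not_contains _ v hck2,
      PySem.Dict.items_insert_of_contains _ w hc, List.map_append]
    simp [hne'']

-- a pending insert of a key not touched by the loop slides through the loop
theorem pv_foldl_insert_slide {κ ν : Type} [BEq κ] [LawfulBEq κ]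
    (l : List (κ × ν)) (d : PySem.Dict κ ν) (k : κ) (w : ν)
    (hc : d.contains k = true) (hl : ∀ p ∈ l, p.1 ≠ k) :
    (l.foldl (fun d p => d.insert p.1 p.2) d).insert k w =
      l.foldl (fun d p => d.insert p.1 p.2) (d.insert k w) := by
  induction l generalizing d with
  | nil => rfl
  | cons p t ih =>
    rw [List.foldl_cons, List.foldl_cons,
      ih (d.insert p.1 p.2) (by rw [PySem.Dict.contains_insert]; simp [hc])
        (fun q hq => hl q (List.mem_cons_of_mem _ hq)),
      pv_insert_comm d k p.1 p.2 w (fun h => hl p (List.mem_cons_self ..) h.symm) hc]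

-- inserting over a fold whose key list is Nodup and contains k = folding with k's value replaced
theorem pv_foldl_insert_replace {κ ν : Type} [BEq κ] [LawfulBEq κ] [DecidableEq κ]
    (l : List (κ × ν)) (d : PySem.Dict κ ν) (k : κ) (w : ν)
    (hnd : (l.map Prod.fst).Nodup) (hmem : k ∈ l.map Prod.fst) :
    (l.foldl (fun d p => d.insert p.1 p.2) d).insert k w =
      (l.map (fun p => if p.1 = k then (p.1, w) else p)).foldl (fun d p => d.insert p.1 p.2) d := by
  induction l generalizing d with
  | nil => simp at hmem
  | cons p t ih =>
    by_cases hp : p.1 = k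
    · subst hp
      have ht : ∀ q ∈ t, q.1 ≠ p.1 := by
        intro q hq hqe
        simp only [List.map_cons, List.nodup_cons] at hnd
        exact hnd.1 (hqe ▸ List.mem_map_of_mem hq)
      have htail : t.map (fun q => if q.1 = p.1 then (q.1, w) else q) = t := by
        conv_rhs => rw [← List.map_id t]
        apply List.map_congr_left
        intro q hq
        simp [ht q hq]
      rw [List.foldl_cons, pv_foldl_insert_slide t (d.insert p.1 p.2) p.1 w
          (PySem.Dict.contains_insert_self ..) ht,
        pv_insert_absorb, List.map_cons, if_pos rfl, List.foldl_cons, htail]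
    · have hmem' : k ∈ t.map Prod.fst := by
        rcases List.mem_map.mp hmem with ⟨q, hq, hqe⟩
        rcases List.mem_cons.mp hq with h | h
        · exact absurd (h ▸ hqe) hp
        · exact hqe ▸ List.mem_map_of_mem h
      have hnd' : (t.map Prod.fst).Nodup := by
        simp only [List.map_cons, List.nodup_cons] at hnd; exact hnd.2
      rw [List.foldl_cons, ih (d.insert p.1 p.2) hnd' hmem', List.map_cons, if_neg hp,
        List.foldl_cons]

def pvMerge {κ ν : Type} [DecidableEq κ] (xs ys : List (κ × ν)) : List (κ × ν) :=
  ys.foldl (fun acc p => acc.map (fun q => if q.1 = p.1 then (q.1, p.2) else q)) xs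

-- two successive dict.update passes collapse into one update by the merged pair list
theorem pv_update_update {κ ν : Type} [BEq κ] [LawfulBEq κ] [DecidableEq κ]
    (xs ys : List (κ × ν)) (d : PySem.Dict κ ν)
    (hnd : (xs.map Prod.fst).Nodup) (hsub : ∀ p ∈ ys, p.1 ∈ xs.map Prod.fst) :
    ys.foldl (fun d p => d.insert p.1 p.2) (xs.foldl (fun d p => d.insert p.1 p.2) d) =
      (pvMerge xs ys).foldl (fun d p => d.insert p.1 p.2) d := by
  induction ys generalizing xs with
  | nil => rfl
  | cons p t ih =>
    have hfst : ((xs.map (fun q => if q.1 = p.1 then (q.1, p.2) else q)).map Prod.fst)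
        = xs.map Prod.fst := by
      rw [List.map_map]
      apply List.map_congr_left
      intro q _
      by_cases hq : q.1 = p.1 <;> simp [hq]
    rw [List.foldl_cons,
      pv_foldl_insert_replace xs d p.1 p.2 hnd (hsub p (List.mem_cons_self ..)),
      ih (xs.map (fun q => if q.1 = p.1 then (q.1, p.2) else q)) (hfst ▸ hnd)
        (fun q hq => hfst ▸ hsub q (List.mem_cons_of_mem _ hq))]
    rfl

-- ===== VERDICT (by name: the statement is the Claim_ definition above) =====
set_option maxHeartbeats 1000000 in
theorem pv_case_b0_s0 (probabilities : List (String × Int)) :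
    (((((((((((((PySem.Dict.mk probabilities).insert "Super-Luxury" 70).insert "Ultra-Luxury" 25).insert "Luxury" 5).insert "Premium" 0).insert "Mid-Range" 0).insert "Economy" 0).insert "Economy" 90).insert "Mid-Range" 10).insert "Premium" 0).insert "Luxury" 0).insert "Ultra-Luxury" 0).insert "Super-Luxury" 0).items = ((PySem.Dict.mk probabilities).update ((PySem.Dict.ofList ((PySem.List.pyGet? pvBrandResults 0).getD [])).update ((PySem.List.pyGet? pvSegmentResults 0).getD [])).items).items := by
  rw [show ((PySem.Dict.ofList ((PySem.List.pyGet? pvBrandResults 0).getD [])).update ((PySem.List.pyGet? pvSegmentResults 0).getD [])).items = [("Super-Luxury", (0:Int)), ("Ultra-Luxury", 0), ("Luxury", 0), ("Premium", 0), ("Mid-Range", 10), ("Economy", 90)] from by decide]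
  have h := pv_update_update [("Super-Luxury", (70:Int)), ("Ultra-Luxury", 25), ("Luxury", 5), ("Premium", 0), ("Mid-Range", 0), ("Economy", 0)]
    [("Economy", (90:Int)), ("Mid-Range", 10), ("Premium", 0), ("Luxury", 0), ("Ultra-Luxury", 0), ("Super-Luxury", 0)]
    (PySem.Dict.mk probabilities) (by decide) (by decide)
  rw [show pvMerge [("Super-Luxury", (70:Int)), ("Ultra-Luxury", 25), ("Luxury", 5), ("Premium", 0), ("Mid-Range", 0), ("Economy", 0)]
      [("Economy", (90:Int)), ("Mid-Range", 10), ("Premium", 0), ("Luxury", 0), ("Ultra-Luxury", 0), ("Super-Luxury", 0)]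
    = [("Super-Luxury", (0:Int)), ("Ultra-Luxury", 0), ("Luxury", 0), ("Premium", 0), ("Mid-Range", 10), ("Economy", 90)] from by decide] at h
  simp only [PySem.Dict.update, List.foldl_cons, List.foldl_nil] at h ⊢
  exact congrArg PySem.Dict.items h

set_option maxHeartbeats 1000000 in
theorem pv_case_b0_s1 (probabilities : List (String × Int)) :
    (((((((((((((PySem.Dict.mk probabilities).insert "Super-Luxury" 70).insert "Ultra-Luxury" 25).insert "Luxury" 5).insert "Premium" 0).insert "Mid-Range" 0).insert "Economy" 0).insert "Mid-Range" 80).insert "Economy" 15).insert "Premium" 5).insert "Luxury" 0).insert "Ultra-Luxury" 0).insert "Super-Luxury" 0).items = ((PySem.Dict.mk probabilities).update ((PySem.Dict.ofList ((PySem.List.pyGet? pvBrandResults 0).getD [])).update ((PySem.List.pyGet? pvSegmentResults 1).getD [])).items).items := by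
  rw [show ((PySem.Dict.ofList ((PySem.List.pyGet? pvBrandResults 0).getD [])).update ((PySem.List.pyGet? pvSegmentResults 1).getD [])).items = [("Super-Luxury", (0:Int)), ("Ultra-Luxury", 0), ("Luxury", 0), ("Premium", 5), ("Mid-Range", 80), ("Economy", 15)] from by decide]
  have h := pv_update_update [("Super-Luxury", (70:Int)), ("Ultra-Luxury", 25), ("Luxury", 5), ("Premium", 0), ("Mid-Range", 0), ("Economy", 0)]
    [("Mid-Range", (80:Int)), ("Economy", 15), ("Premium", 5), ("Luxury", 0), ("Ultra-Luxury", 0), ("Super-Luxury", 0)]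
    (PySem.Dict.mk probabilities) (by decide) (by decide)
  rw [show pvMerge [("Super-Luxury", (70:Int)), ("Ultra-Luxury", 25), ("Luxury", 5), ("Premium", 0), ("Mid-Range", 0), ("Economy", 0)]
      [("Mid-Range", (80:Int)), ("Economy", 15), ("Premium", 5), ("Luxury", 0), ("Ultra-Luxury", 0), ("Super-Luxury", 0)]
    = [("Super-Luxury", (0:Int)), ("Ultra-Luxury", 0), ("Luxury", 0), ("Premium", 5), ("Mid-Range", 80), ("Economy", 15)] from by decide] at h
  simp only [PySem.Dict.update, List.foldl_cons, List.foldl_nil] at h ⊢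
  exact congrArg PySem.Dict.items h

set_option maxHeartbeats 1000000 in
theorem pv_case_b0_sNone (probabilities : List (String × Int)) :
    (((((((PySem.Dict.mk probabilities).insert "Super-Luxury" 70).insert "Ultra-Luxury" 25).insert "Luxury" 5).insert "Premium" 0).insert "Mid-Range" 0).insert "Economy" 0).items = ((PySem.Dict.mk probabilities).update (PySem.Dict.ofList ((PySem.List.pyGet? pvBrandResults 0).getD [])).items).items := by
  rw [show (PySem.Dict.ofList ((PySem.List.pyGet? pvBrandResults 0).getD [])).items = [("Super-Luxury", (70:Int)), ("Ultra-Luxury", 25), ("Luxury", 5), ("Premium", 0), ("Mid-Range", 0), ("Economy", 0)] from by decide]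
  simp only [PySem.Dict.update, List.foldl_cons, List.foldl_nil]

set_option maxHeartbeats 1000000 in
theorem pv_case_b1_s0 (probabilities : List (String × Int)) :
    (((((((((((((PySem.Dict.mk probabilities).insert "Ultra-Luxury" 80).insert "Luxury" 20).insert "Premium" 0).insert "Mid-Range" 0).insert "Economy" 0).insert "Super-Luxury" 0).insert "Economy" 90).insert "Mid-Range" 10).insert "Premium" 0).insert "Luxury" 0).insert "Ultra-Luxury" 0).insert "Super-Luxury" 0).items = ((PySem.Dict.mk probabilities).update ((PySem.Dict.ofList ((PySem.List.pyGet? pvBrandResults 1).getD [])).update ((PySem.List.pyGet? pvSegmentResults 0).getD [])).items).items := by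
  rw [show ((PySem.Dict.ofList ((PySem.List.pyGet? pvBrandResults 1).getD [])).update ((PySem.List.pyGet? pvSegmentResults 0).getD [])).items = [("Ultra-Luxury", (0:Int)), ("Luxury", 0), ("Premium", 0), ("Mid-Range", 10), ("Economy", 90), ("Super-Luxury", 0)] from by decide]
  have h := pv_update_update [("Ultra-Luxury", (80:Int)), ("Luxury", 20), ("Premium", 0), ("Mid-Range", 0), ("Economy", 0), ("Super-Luxury", 0)]
    [("Economy", (90:Int)), ("Mid-Range", 10), ("Premium", 0), ("Luxury", 0), ("Ultra-Luxury", 0), ("Super-Luxury", 0)]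
    (PySem.Dict.mk probabilities) (by decide) (by decide)
  rw [show pvMerge [("Ultra-Luxury", (80:Int)), ("Luxury", 20), ("Premium", 0), ("Mid-Range", 0), ("Economy", 0), ("Super-Luxury", 0)]
      [("Economy", (90:Int)), ("Mid-Range", 10), ("Premium", 0), ("Luxury", 0), ("Ultra-Luxury", 0), ("Super-Luxury", 0)]
    = [("Ultra-Luxury", (0:Int)), ("Luxury", 0), ("Premium", 0), ("Mid-Range", 10), ("Economy", 90), ("Super-Luxury", 0)] from by decide] at h
  simp only [PySem.Dict.update, List.foldl_cons, List.foldl_nil] at h ⊢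
  exact congrArg PySem.Dict.items h

set_option maxHeartbeats 1000000 in
theorem pv_case_b1_s1 (probabilities : List (String × Int)) :
    (((((((((((((PySem.Dict.mk probabilities).insert "Ultra-Luxury" 80).insert "Luxury" 20).insert "Premium" 0).insert "Mid-Range" 0).insert "Economy" 0).insert "Super-Luxury" 0).insert "Mid-Range" 80).insert "Economy" 15).insert "Premium" 5).insert "Luxury" 0).insert "Ultra-Luxury" 0).insert "Super-Luxury" 0).items = ((PySem.Dict.mk probabilities).update ((PySem.Dict.ofList ((PySem.List.pyGet? pvBrandResults 1).getD [])).update ((PySem.List.pyGet? pvSegmentResults 1).getD [])).items).items := by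
  rw [show ((PySem.Dict.ofList ((PySem.List.pyGet? pvBrandResults 1).getD [])).update ((PySem.List.pyGet? pvSegmentResults 1).getD [])).items = [("Ultra-Luxury", (0:Int)), ("Luxury", 0), ("Premium", 5), ("Mid-Range", 80), ("Economy", 15), ("Super-Luxury", 0)] from by decide]
  have h := pv_update_update [("Ultra-Luxury", (80:Int)), ("Luxury", 20), ("Premium", 0), ("Mid-Range", 0), ("Economy", 0), ("Super-Luxury", 0)]
    [("Mid-Range", (80:Int)), ("Economy", 15), ("Premium", 5), ("Luxury", 0), ("Ultra-Luxury", 0), ("Super-Luxury", 0)]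
    (PySem.Dict.mk probabilities) (by decide) (by decide)
  rw [show pvMerge [("Ultra-Luxury", (80:Int)), ("Luxury", 20), ("Premium", 0), ("Mid-Range", 0), ("Economy", 0), ("Super-Luxury", 0)]
      [("Mid-Range", (80:Int)), ("Economy", 15), ("Premium", 5), ("Luxury", 0), ("Ultra-Luxury", 0), ("Super-Luxury", 0)]
    = [("Ultra-Luxury", (0:Int)), ("Luxury", 0), ("Premium", 5), ("Mid-Range", 80), ("Economy", 15), ("Super-Luxury", 0)] from by decide] at h
  simp only [PySem.Dict.update, List.foldl_cons, List.foldl_nil] at h ⊢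
  exact congrArg PySem.Dict.items h

set_option maxHeartbeats 1000000 in
theorem pv_case_b1_sNone (probabilities : List (String × Int)) :
    (((((((PySem.Dict.mk probabilities).insert "Ultra-Luxury" 80).insert "Luxury" 20).insert "Premium" 0).insert "Mid-Range" 0).insert "Economy" 0).insert "Super-Luxury" 0).items = ((PySem.Dict.mk probabilities).update (PySem.Dict.ofList ((PySem.List.pyGet? pvBrandResults 1).getD [])).items).items := by
  rw [show (PySem.Dict.ofList ((PySem.List.pyGet? pvBrandResults 1).getD [])).items = [("Ultra-Luxury", (80:Int)), ("Luxury", 20), ("Premium", 0), ("Mid-Range", 0), ("Economy", 0), ("Super-Luxury", 0)] from by decide]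
  simp only [PySem.Dict.update, List.foldl_cons, List.foldl_nil]

set_option maxHeartbeats 1000000 in
theorem pv_case_b2_s0 (probabilities : List (String × Int)) :
    (((((((((((((PySem.Dict.mk probabilities).insert "Luxury" 60).insert "Ultra-Luxury" 30).insert "Premium" 10).insert "Mid-Range" 0).insert "Economy" 0).insert "Super-Luxury" 0).insert "Economy" 90).insert "Mid-Range" 10).insert "Premium" 0).insert "Luxury" 0).insert "Ultra-Luxury" 0).insert "Super-Luxury" 0).items = ((PySem.Dict.mk probabilities).update ((PySem.Dict.ofList ((PySem.List.pyGet? pvBrandResults 2).getD [])).update ((PySem.List.pyGet? pvSegmentResults 0).getD [])).items).items := by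
  rw [show ((PySem.Dict.ofList ((PySem.List.pyGet? pvBrandResults 2).getD [])).update ((PySem.List.pyGet? pvSegmentResults 0).getD [])).items = [("Luxury", (0:Int)), ("Ultra-Luxury", 0), ("Premium", 0), ("Mid-Range", 10), ("Economy", 90), ("Super-Luxury", 0)] from by decide]
  have h := pv_update_update [("Luxury", (60:Int)), ("Ultra-Luxury", 30), ("Premium", 10), ("Mid-Range", 0), ("Economy", 0), ("Super-Luxury", 0)]
    [("Economy", (90:Int)), ("Mid-Range", 10), ("Premium", 0), ("Luxury", 0), ("Ultra-Luxury", 0), ("Super-Luxury", 0)]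
    (PySem.Dict.mk probabilities) (by decide) (by decide)
  rw [show pvMerge [("Luxury", (60:Int)), ("Ultra-Luxury", 30), ("Premium", 10), ("Mid-Range", 0), ("Economy", 0), ("Super-Luxury", 0)]
      [("Economy", (90:Int)), ("Mid-Range", 10), ("Premium", 0), ("Luxury", 0), ("Ultra-Luxury", 0), ("Super-Luxury", 0)]
    = [("Luxury", (0:Int)), ("Ultra-Luxury", 0), ("Premium", 0), ("Mid-Range", 10), ("Economy", 90), ("Super-Luxury", 0)] from by decide] at h
  simp only [PySem.Dict.update, List.foldl_cons, List.foldl_nil] at h ⊢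
  exact congrArg PySem.Dict.items h

set_option maxHeartbeats 1000000 in
theorem pv_case_b2_s1 (probabilities : List (String × Int)) :
    (((((((((((((PySem.Dict.mk probabilities).insert "Luxury" 60).insert "Ultra-Luxury" 30).insert "Premium" 10).insert "Mid-Range" 0).insert "Economy" 0).insert "Super-Luxury" 0).insert "Mid-Range" 80).insert "Economy" 15).insert "Premium" 5).insert "Luxury" 0).insert "Ultra-Luxury" 0).insert "Super-Luxury" 0).items = ((PySem.Dict.mk probabilities).update ((PySem.Dict.ofList ((PySem.List.pyGet? pvBrandResults 2).getD [])).update ((PySem.List.pyGet? pvSegmentResults 1).getD [])).items).items := by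
  rw [show ((PySem.Dict.ofList ((PySem.List.pyGet? pvBrandResults 2).getD [])).update ((PySem.List.pyGet? pvSegmentResults 1).getD [])).items = [("Luxury", (0:Int)), ("Ultra-Luxury", 0), ("Premium", 5), ("Mid-Range", 80), ("Economy", 15), ("Super-Luxury", 0)] from by decide]
  have h := pv_update_update [("Luxury", (60:Int)), ("Ultra-Luxury", 30), ("Premium", 10), ("Mid-Range", 0), ("Economy", 0), ("Super-Luxury", 0)]
    [("Mid-Range", (80:Int)), ("Economy", 15), ("Premium", 5), ("Luxury", 0), ("Ultra-Luxury", 0), ("Super-Luxury", 0)]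
    (PySem.Dict.mk probabilities) (by decide) (by decide)
  rw [show pvMerge [("Luxury", (60:Int)), ("Ultra-Luxury", 30), ("Premium", 10), ("Mid-Range", 0), ("Economy", 0), ("Super-Luxury", 0)]
      [("Mid-Range", (80:Int)), ("Economy", 15), ("Premium", 5), ("Luxury", 0), ("Ultra-Luxury", 0), ("Super-Luxury", 0)]
    = [("Luxury", (0:Int)), ("Ultra-Luxury", 0), ("Premium", 5), ("Mid-Range", 80), ("Economy", 15), ("Super-Luxury", 0)] from by decide] at h
  simp only [PySem.Dict.update, List.foldl_cons, List.foldl_nil] at h ⊢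
  exact congrArg PySem.Dict.items h

set_option maxHeartbeats 1000000 in
theorem pv_case_b2_sNone (probabilities : List (String × Int)) :
    (((((((PySem.Dict.mk probabilities).insert "Luxury" 60).insert "Ultra-Luxury" 30).insert "Premium" 10).insert "Mid-Range" 0).insert "Economy" 0).insert "Super-Luxury" 0).items = ((PySem.Dict.mk probabilities).update (PySem.Dict.ofList ((PySem.List.pyGet? pvBrandResults 2).getD [])).items).items := by
  rw [show (PySem.Dict.ofList ((PySem.List.pyGet? pvBrandResults 2).getD [])).items = [("Luxury", (60:Int)), ("Ultra-Luxury", 30), ("Premium", 10), ("Mid-Range", 0), ("Economy", 0), ("Super-Luxury", 0)] from by decide]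
  simp only [PySem.Dict.update, List.foldl_cons, List.foldl_nil]

set_option maxHeartbeats 1000000 in
theorem pv_case_b3_s0 (probabilities : List (String × Int)) :
    (((((((((((((PySem.Dict.mk probabilities).insert "Premium" 70).insert "Mid-Range" 25).insert "Luxury" 5).insert "Ultra-Luxury" 0).insert "Economy" 0).insert "Super-Luxury" 0).insert "Economy" 90).insert "Mid-Range" 10).insert "Premium" 0).insert "Luxury" 0).insert "Ultra-Luxury" 0).insert "Super-Luxury" 0).items = ((PySem.Dict.mk probabilities).update ((PySem.Dict.ofList ((PySem.List.pyGet? pvBrandResults 3).getD [])).update ((PySem.List.pyGet? pvSegmentResults 0).getD [])).items).items := by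
  rw [show ((PySem.Dict.ofList ((PySem.List.pyGet? pvBrandResults 3).getD [])).update ((PySem.List.pyGet? pvSegmentResults 0).getD [])).items = [("Premium", (0:Int)), ("Mid-Range", 10), ("Luxury", 0), ("Ultra-Luxury", 0), ("Economy", 90), ("Super-Luxury", 0)] from by decide]
  have h := pv_update_update [("Premium", (70:Int)), ("Mid-Range", 25), ("Luxury", 5), ("Ultra-Luxury", 0), ("Economy", 0), ("Super-Luxury", 0)]
    [("Economy", (90:Int)), ("Mid-Range", 10), ("Premium", 0), ("Luxury", 0), ("Ultra-Luxury", 0), ("Super-Luxury", 0)]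
    (PySem.Dict.mk probabilities) (by decide) (by decide)
  rw [show pvMerge [("Premium", (70:Int)), ("Mid-Range", 25), ("Luxury", 5), ("Ultra-Luxury", 0), ("Economy", 0), ("Super-Luxury", 0)]
      [("Economy", (90:Int)), ("Mid-Range", 10), ("Premium", 0), ("Luxury", 0), ("Ultra-Luxury", 0), ("Super-Luxury", 0)]
    = [("Premium", (0:Int)), ("Mid-Range", 10), ("Luxury", 0), ("Ultra-Luxury", 0), ("Economy", 90), ("Super-Luxury", 0)] from by decide] at h
  simp only [PySem.Dict.update, List.foldl_cons, List.foldl_nil] at h ⊢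
  exact congrArg PySem.Dict.items h

set_option maxHeartbeats 1000000 in
theorem pv_case_b3_s1 (probabilities : List (String × Int)) :
    (((((((((((((PySem.Dict.mk probabilities).insert "Premium" 70).insert "Mid-Range" 25).insert "Luxury" 5).insert "Ultra-Luxury" 0).insert "Economy" 0).insert "Super-Luxury" 0).insert "Mid-Range" 80).insert "Economy" 15).insert "Premium" 5).insert "Luxury" 0).insert "Ultra-Luxury" 0).insert "Super-Luxury" 0).items = ((PySem.Dict.mk probabilities).update ((PySem.Dict.ofList ((PySem.List.pyGet? pvBrandResults 3).getD [])).update ((PySem.List.pyGet? pvSegmentResults 1).getD [])).items).items := by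
  rw [show ((PySem.Dict.ofList ((PySem.List.pyGet? pvBrandResults 3).getD [])).update ((PySem.List.pyGet? pvSegmentResults 1).getD [])).items = [("Premium", (5:Int)), ("Mid-Range", 80), ("Luxury", 0), ("Ultra-Luxury", 0), ("Economy", 15), ("Super-Luxury", 0)] from by decide]
  have h := pv_update_update [("Premium", (70:Int)), ("Mid-Range", 25), ("Luxury", 5), ("Ultra-Luxury", 0), ("Economy", 0), ("Super-Luxury", 0)]
    [("Mid-Range", (80:Int)), ("Economy", 15), ("Premium", 5), ("Luxury", 0), ("Ultra-Luxury", 0), ("Super-Luxury", 0)]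
    (PySem.Dict.mk probabilities) (by decide) (by decide)
  rw [show pvMerge [("Premium", (70:Int)), ("Mid-Range", 25), ("Luxury", 5), ("Ultra-Luxury", 0), ("Economy", 0), ("Super-Luxury", 0)]
      [("Mid-Range", (80:Int)), ("Economy", 15), ("Premium", 5), ("Luxury", 0), ("Ultra-Luxury", 0), ("Super-Luxury", 0)]
    = [("Premium", (5:Int)), ("Mid-Range", 80), ("Luxury", 0), ("Ultra-Luxury", 0), ("Economy", 15), ("Super-Luxury", 0)] from by decide] at h
  simp only [PySem.Dict.update, List.foldl_cons, List.foldl_nil] at h ⊢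
  exact congrArg PySem.Dict.items h

set_option maxHeartbeats 1000000 in
theorem pv_case_b3_sNone (probabilities : List (String × Int)) :
    (((((((PySem.Dict.mk probabilities).insert "Premium" 70).insert "Mid-Range" 25).insert "Luxury" 5).insert "Ultra-Luxury" 0).insert "Economy" 0).insert "Super-Luxury" 0).items = ((PySem.Dict.mk probabilities).update (PySem.Dict.ofList ((PySem.List.pyGet? pvBrandResults 3).getD [])).items).items := by
  rw [show (PySem.Dict.ofList ((PySem.List.pyGet? pvBrandResults 3).getD [])).items = [("Premium", (70:Int)), ("Mid-Range", 25), ("Luxury", 5), ("Ultra-Luxury", 0), ("Economy", 0), ("Super-Luxury", 0)] from by decide]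
  simp only [PySem.Dict.update, List.foldl_cons, List.foldl_nil]

set_option maxHeartbeats 1000000 in
theorem pv_case_bNone_s0 (probabilities : List (String × Int)) :
    (((((((PySem.Dict.mk probabilities).insert "Economy" 90).insert "Mid-Range" 10).insert "Premium" 0).insert "Luxury" 0).insert "Ultra-Luxury" 0).insert "Super-Luxury" 0).items = ((PySem.Dict.mk probabilities).update ((PySem.Dict.empty : PySem.Dict String Int).update ((PySem.List.pyGet? pvSegmentResults 0).getD [])).items).items := by
  rw [show ((PySem.Dict.empty : PySem.Dict String Int).update ((PySem.List.pyGet? pvSegmentResults 0).getD [])).items = [("Economy", (90:Int)), ("Mid-Range", 10), ("Premium", 0), ("Luxury", 0), ("Ultra-Luxury", 0), ("Super-Luxury", 0)] from by decide]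
  simp only [PySem.Dict.update, List.foldl_cons, List.foldl_nil]

set_option maxHeartbeats 1000000 in
theorem pv_case_bNone_s1 (probabilities : List (String × Int)) :
    (((((((PySem.Dict.mk probabilities).insert "Mid-Range" 80).insert "Economy" 15).insert "Premium" 5).insert "Luxury" 0).insert "Ultra-Luxury" 0).insert "Super-Luxury" 0).items = ((PySem.Dict.mk probabilities).update ((PySem.Dict.empty : PySem.Dict String Int).update ((PySem.List.pyGet? pvSegmentResults 1).getD [])).items).items := by
  rw [show ((PySem.Dict.empty : PySem.Dict String Int).update ((PySem.List.pyGet? pvSegmentResults 1).getD [])).items = [("Mid-Range", (80:Int)), ("Economy", 15), ("Premium", 5), ("Luxury", 0), ("Ultra-Luxury", 0), ("Super-Luxury", 0)] from by decide]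
  simp only [PySem.Dict.update, List.foldl_cons, List.foldl_nil]

set_option maxHeartbeats 1000000 in
theorem pv_case_bNone_sNone (probabilities : List (String × Int)) :
    (PySem.Dict.mk probabilities).items = ((PySem.Dict.mk probabilities).update (PySem.Dict.empty : PySem.Dict String Int).items).items := by
  rw [show (PySem.Dict.empty : PySem.Dict String Int).items = ([] : List (String × Int)) from rfl]
  simp only [PySem.Dict.update, List.foldl_nil]

set_option maxHeartbeats 2000000 in
theorem adjust_probabilities_by_context_py_spec : Claim_equal_adjust_probabilities_by_context_py := by
  intro probabilities context_hint _
  unfold Spec_adjust_probabilities_by_context_py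
  simp only [adjust_probabilities_by_context_py, adjust_probabilities_by_context_py_alt,
    pvBestTier_brand, pvBestTier_segment]
  split_ifs
  all_goals dsimp only
  · exact pv_case_b0_s0 probabilities
  · exact pv_case_b1_s0 probabilities
  · exact pv_case_b2_s0 probabilities
  · exact pv_case_b3_s0 probabilities
  · exact pv_case_bNone_s0 probabilities
  · exact pv_case_b0_s1 probabilities
  · exact pv_case_b1_s1 probabilities
  · exact pv_case_b2_s1 probabilities
  · exact pv_case_b3_s1 probabilities
  · exact pv_case_bNone_s1 probabilities
  · exact pv_case_b0_sNone probabilities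
  · exact pv_case_b1_sNone probabilities
  · exact pv_case_b2_sNone probabilities
  · exact pv_case_b3_sNone probabilities
  · exact pv_case_bNone_sNone probabilities
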